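-- pv_equiv track=rewrite | github.com/jeongYuri/coding-test-solution | 프로그래머스/unrated/181890. 왼쪽 오른쪽/왼쪽 오른쪽.py | solution
-- ===== SOURCE A (Python) =====
-- def solution(str_list):
--     answer = []
--     for s in str_list:
--         if s =="l":
--             text = "s"
--             if len(text)==1:
--                 a = str_list.index('l')
--                 return str_list[:a]
--         elif s =="r":
--             text = "r"
--             if len(text)==1:
--                 a = str_list.index('r')
--                 return str_list[a+1:]
--     return answer
-- ===== SOURCE B (Python) =====
-- def solution(str_list):
--     n = len(str_list)
--     l = str_list.index('l') if 'l' in str_list else n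
--     r = str_list.index('r') if 'r' in str_list else n
--     return str_list[:l] if l < r else str_list[r+1:]
-- ===== Notes on version B (the rewrite author's own statement) =====
-- stated objective: simpler
-- what changed: Replaces A's element-by-element scan with early returns by computing the first-occurrence indices of 'l' and 'r' (with len as absent-sentinel) and a single comparison deciding which slice to return.
import Mathlib
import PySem

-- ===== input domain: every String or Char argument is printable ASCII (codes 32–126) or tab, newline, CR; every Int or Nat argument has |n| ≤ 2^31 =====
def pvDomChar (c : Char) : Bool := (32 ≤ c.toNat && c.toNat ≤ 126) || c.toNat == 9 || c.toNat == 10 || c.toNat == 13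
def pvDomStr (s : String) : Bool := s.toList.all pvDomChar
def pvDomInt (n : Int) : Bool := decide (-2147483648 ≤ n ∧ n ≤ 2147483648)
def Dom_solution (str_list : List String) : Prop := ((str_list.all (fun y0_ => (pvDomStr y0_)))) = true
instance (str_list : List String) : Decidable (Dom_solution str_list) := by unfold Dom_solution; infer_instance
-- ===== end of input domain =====

-- B is simpler: it computes the first-occurrence indices of "l" and "r" once and decides by one comparison, instead of A's scan with early returns.

-- ===== PORT A =====
-- the for-loop over str_list; `full` is the whole list (Python's str_list, used by .index and the slices)
def solutionGo (full : List String) : List String → List String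
  | [] => []                                   -- loop ends: return answer = []
  | s :: rest =>
    if s = "l" then
      -- a = str_list.index('l')  (s == 'l' is in the list, so .index never raises; getD 0 is unreachable)
      let a : Nat := (PySem.List.index? full "l").getD 0
      PySem.List.slice full none (some (a : Int))          -- str_list[:a]
    else if s = "r" then
      let a : Nat := (PySem.List.index? full "r").getD 0
      PySem.List.slice full (some ((a : Int) + 1)) none    -- str_list[a+1:]
    else solutionGo full rest

def solution (str_list : List String) : List String :=
  solutionGo str_list str_list

-- ===== PORT B =====
def solution_alt (str_list : List String) : List String :=
  let n := str_list.length
  let l : Nat := if str_list.contains "l" then (PySem.List.index? str_list "l").getD 0 else n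
  let r : Nat := if str_list.contains "r" then (PySem.List.index? str_list "r").getD 0 else n
  if l < r then PySem.List.slice str_list none (some (l : Int))
  else PySem.List.slice str_list (some ((r : Int) + 1)) none

-- ===== PRECONDITION & SPEC =====
def Spec_solution (str_list : List String) (out : List String) : Prop := out = solution_alt str_list
instance (str_list : List String) (out : List String) : Decidable (Spec_solution str_list out) := by unfold Spec_solution; infer_instance

-- ===== CLAIM (what is proved, stated in full; the proofs are below) =====
def Claim_equal_solution : Prop := ∀ (str_list : List String), Dom_solution str_list → Spec_solution str_list (solution str_list)

-- ===== LEMMAS AND PROOFS =====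

-- the first occurrence of v in pre ++ v :: t is at pre.length
theorem index_first (pre t : List String) (v : String) (h : v ∉ pre) :
    PySem.List.index? (pre ++ v :: t) v = some pre.length :=
  (PySem.List.index?_eq_some_iff _ _ _).mpr ⟨pre, t, rfl, rfl, h⟩

-- if v is absent from pre and differs from s, its first index in pre ++ s :: t is past pre
theorem index_late (pre t : List String) (s v : String) (hpre : v ∉ pre) (hs : s ≠ v)
    (k : Nat) (hk : PySem.List.index? (pre ++ s :: t) v = some k) : pre.length < k := by
  obtain ⟨hlt, hget, -⟩ := PySem.List.getElem_of_index?_eq_some hk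
  by_contra hle
  rw [Nat.not_lt] at hle
  rcases Nat.lt_or_eq_of_le hle with h' | h'
  · exact hpre (by rw [List.getElem_append_left h'] at hget; exact hget ▸ List.getElem_mem h')
  · subst h'
    apply hs
    rw [← hget, List.getElem_append_right (Nat.le_refl _)]
    simp

theorem go_eq_alt (full : List String) : ∀ (rest pre : List String),
    full = pre ++ rest → "l" ∉ pre → "r" ∉ pre →
    solutionGo full rest = solution_alt full := by
  intro rest
  induction rest with
  | nil =>
    intro pre hfull hl hr
    subst hfull
    simp only [List.append_nil] at hl hr ⊢
    have hcl : pre.contains "l" = false := by simp [hl]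
    have hcr : pre.contains "r" = false := by simp [hr]
    simp only [solutionGo, solution_alt, hcl, hcr, Bool.false_eq_true, if_false, Nat.lt_irrefl]
    have h1 : ((pre.length : Int) + 1) = ((pre.length + 1 : Nat) : Int) := by push_cast; ring
    rw [h1, PySem.List.slice_from_natCast]
    simp
  | cons s t ih =>
    intro pre hfull hl hr
    by_cases hsl : s = "l"
    · subst hsl
      have hidx : PySem.List.index? full "l" = some pre.length := hfull ▸ index_first pre t "l" hl
      have hmem : full.contains "l" = true := by simp [hfull]
      have hlt : ∀ k, PySem.List.index? full "r" = some k → pre.length < k := by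
        intro k hk
        exact index_late pre t "l" "r" hr (by decide) k (hfull ▸ hk)
      simp only [solutionGo, solution_alt, hmem, if_true, hidx, Option.getD_some]
      rcases hcr : full.contains "r" with _ | _
      · have hr' : "r" ∉ full := by simpa using hcr
        have hnone : PySem.List.index? full "r" = none :=
          (PySem.List.index?_eq_none_iff _ _).mpr hr'
        have hlen : pre.length < full.length := by subst hfull; simp
        simp [hlen]
      · have hsome : (PySem.List.index? full "r").isSome := by
          apply (PySem.List.index?_isSome_iff _ _).mpr
          simpa using hcr
        obtain ⟨k, hk⟩ := Option.isSome_iff_exists.mp hsome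
        have hk' : List.idxOf? "r" full = some k := by
          simpa [PySem.List.index?_eq_idxOf?] using hk
        simp [hk', hlt k hk]
    · by_cases hsr : s = "r"
      · subst hsr
        have hidx : PySem.List.index? full "r" = some pre.length := hfull ▸ index_first pre t "r" hr
        have hmem : full.contains "r" = true := by simp [hfull]
        have hlt : ∀ k, PySem.List.index? full "l" = some k → pre.length < k := by
          intro k hk
          exact index_late pre t "r" "l" hl (by decide) k (hfull ▸ hk)
        simp only [solutionGo, solution_alt, hmem, if_true, hidx, Option.getD_some,
          if_neg (by decide : ¬ ("r" = "l"))]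
        rcases hcl : full.contains "l" with _ | _
        · have hl' : "l" ∉ full := by simpa using hcl
          have hnone : PySem.List.index? full "l" = none :=
            (PySem.List.index?_eq_none_iff _ _).mpr hl'
          have hlen : pre.length < full.length := by subst hfull; simp
          simp [Nat.not_lt_of_lt hlen]
        · have hsome : (PySem.List.index? full "l").isSome := by
            apply (PySem.List.index?_isSome_iff _ _).mpr
            simpa using hcl
          obtain ⟨k, hk⟩ := Option.isSome_iff_exists.mp hsome
          have hklt := hlt k hk
          have hk' : List.idxOf? "l" full = some k := by
            simpa [PySem.List.index?_eq_idxOf?] using hk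
          simp [hk', Nat.not_lt.mpr (Nat.le_of_lt hklt)]
      · have hstep : solutionGo full (s :: t) = solutionGo full t := by
          simp [solutionGo, hsl, hsr]
        rw [hstep]
        exact ih (pre ++ [s]) (by simp [hfull]) (by simp [hl, Ne.symm hsl]) (by simp [hr, Ne.symm hsr])

-- ===== VERDICT (by name: the statement is the Claim_ definition above) =====
theorem solution_spec : Claim_equal_solution := by
  intro str_list _
  unfold Spec_solution solution
  exact go_eq_alt str_list str_list [] rfl (by simp) (by simp)
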